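-- pv_equiv track=rewrite | github.com/ivelinakaraivanova/SoftUniPythonFundamentals | src/Functions_Exercise/10_Array_Manipulator.py | min_odd
-- ===== SOURCE A (Python) =====
-- def min_odd(input_list):
--     index_mio = None
--     mini = 999999999999999
--     for index in range(len(input_list)):
--         if input_list[index] % 2 == 1 and input_list[index] <= mini:
--             mini = input_list[index]
--             index_mio = index
--     return index_mio
-- ===== SOURCE B (Python) =====
-- def min_odd(input_list):
--     odds = [v for v in input_list if v % 2 == 1]
--     if not odds:
--         return None
--     m = min(odds)
--     result = None
--     for i, v in enumerate(input_list):
--         if v == m: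
--             result = i
--     return result
-- ===== Notes on version B (the rewrite author's own statement) =====
-- stated objective: alternative
-- what changed: Replaces A's single fused scan carrying a running minimum and index with a two-pass structure: first compute the minimum odd value with min(), then a second enumerate pass records the last index holding that value.
import Mathlib
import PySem

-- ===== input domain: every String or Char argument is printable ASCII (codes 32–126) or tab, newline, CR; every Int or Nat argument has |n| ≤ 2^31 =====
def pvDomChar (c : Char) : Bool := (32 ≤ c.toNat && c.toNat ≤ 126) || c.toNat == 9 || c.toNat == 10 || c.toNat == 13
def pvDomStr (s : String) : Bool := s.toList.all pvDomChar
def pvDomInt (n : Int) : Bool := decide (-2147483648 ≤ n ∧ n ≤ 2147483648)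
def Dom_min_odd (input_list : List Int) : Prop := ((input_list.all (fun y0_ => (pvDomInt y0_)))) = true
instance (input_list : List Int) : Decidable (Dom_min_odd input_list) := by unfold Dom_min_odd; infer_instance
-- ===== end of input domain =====

-- B is an alternative decomposition of A (find the minimum odd value, then locate its last index; two passes instead of one fused scan); same cost.

-- ===== PORT A =====
-- literal port of A: one scan over range(len(input_list)) carrying (index_mio, mini)
def min_odd (input_list : List Int) : Option Int :=
  (((PySem.List.pyRange 0 (PySem.List.len input_list) 1).foldl
      (fun (st : Option Int × Int) index =>
        let v := PySem.List.pyGetD input_list index 0   -- totality shim: index is always in range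
        if PySem.Int.mod v 2 = 1 ∧ v ≤ st.2 then (some index, v) else st)
      (none, 999999999999999))).1

-- ===== PORT B =====
-- literal port of B: filter the odd values, take their minimum, then record the last index holding it
def min_odd_alt (input_list : List Int) : Option Int :=
  let odds := input_list.filter (fun v => decide (PySem.Int.mod v 2 = 1))
  match PySem.List.min? odds (fun x => x) with
  | none => none
  | some m =>
      (PySem.List.enumerate input_list 0).foldl
        (fun (r : Option Int) (p : Int × Int) =>
          if p.2 = m then some p.1 else r) none

-- ===== PRECONDITION & SPEC =====
def Spec_min_odd (input_list : List Int) (out : Option Int) : Prop := out = min_odd_alt input_list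
instance (input_list : List Int) (out : Option Int) : Decidable (Spec_min_odd input_list out) := by unfold Spec_min_odd; infer_instance

-- ===== CLAIM (what is proved, stated in full; the proofs are below) =====
def Claim_equal_min_odd : Prop := ∀ (input_list : List Int), Dom_min_odd input_list → Spec_min_odd input_list (min_odd input_list)

-- ===== LEMMAS AND PROOFS =====

-- A's loop state after the whole scan, phrased over enumerate
def pvStateA (xs : List Int) : Option Int × Int :=
  (PySem.List.enumerate xs 0).foldl
    (fun (st : Option Int × Int) (p : Int × Int) =>
      if PySem.Int.mod p.2 2 = 1 ∧ p.2 ≤ st.2 then (some p.1, p.2) else st)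
    (none, 999999999999999)

def pvOdds (xs : List Int) : List Int :=
  xs.filter (fun v => decide (PySem.Int.mod v 2 = 1))

def pvLast (xs : List Int) (m : Int) : Option Int :=
  (PySem.List.enumerate xs 0).foldl
    (fun (r : Option Int) (p : Int × Int) =>
      if p.2 = m then some p.1 else r) none

lemma A_eq_state (xs : List Int) : min_odd xs = (pvStateA xs).1 := by
  unfold min_odd pvStateA
  rw [PySem.List.enumerate_eq_map_pyRange xs 0, List.foldl_map]

lemma alt_eq (xs : List Int) :
    min_odd_alt xs =
      match PySem.List.min? (pvOdds xs) (fun x => x) with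
      | none => none
      | some m => pvLast xs m := rfl

lemma min?_id_nil : PySem.List.min? ([] : List Int) (fun y => y) = none :=
  (PySem.List.min?_eq_none_iff _ _).mpr rfl

lemma min?_id_append_singleton (l : List Int) (x : Int) :
    PySem.List.min? (l ++ [x]) (fun y => y) =
      some (match PySem.List.min? l (fun y => y) with
            | none => x
            | some m => min m x) := by
  cases l with
  | nil =>
    rw [List.nil_append, PySem.List.min?_id_cons, min?_id_nil]
    rfl
  | cons o t =>
    rw [List.cons_append, PySem.List.min?_id_cons, PySem.List.min?_id_cons,
      List.foldl_append]
    simp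

lemma state_spec (xs : List Int) (hd : Dom_min_odd xs) :
    pvStateA xs =
      (match PySem.List.min? (pvOdds xs) (fun y => y) with
       | none => ((none : Option Int), (999999999999999 : Int))
       | some m => (pvLast xs m, m)) := by
  induction xs using List.reverseRecOn with
  | nil =>
    rw [show pvOdds [] = [] from rfl, min?_id_nil]
    rfl
  | append_singleton xs x ih =>
    have hdx : Dom_min_odd xs ∧ pvDomInt x = true := by
      simpa [Dom_min_odd, List.all_append] using hd
    have hxb : -2147483648 ≤ x ∧ x ≤ 2147483648 := by
      have := hdx.2; unfold pvDomInt at this; exact of_decide_eq_true this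
    have ih := ih hdx.1
    have hodds : pvOdds (xs ++ [x]) = pvOdds xs ++
        (if PySem.Int.mod x 2 = 1 then [x] else []) := by
      simp only [pvOdds, List.filter_append, List.filter_singleton]
      congr 1
      rw [Bool.cond_decide]
    have hstate : pvStateA (xs ++ [x]) =
        (if PySem.Int.mod x 2 = 1 ∧ x ≤ (pvStateA xs).2
         then (some (xs.length : Int), x) else pvStateA xs) := by
      unfold pvStateA
      rw [PySem.List.enumerate_append, List.foldl_append, PySem.List.enumerate_cons,
        PySem.List.enumerate_nil]
      simp only [List.foldl_cons, List.foldl_nil, zero_add]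
    have hlast : ∀ m, pvLast (xs ++ [x]) m =
        (if x = m then some (xs.length : Int) else pvLast xs m) := by
      intro m
      unfold pvLast
      rw [PySem.List.enumerate_append, List.foldl_append, PySem.List.enumerate_cons,
        PySem.List.enumerate_nil]
      simp only [List.foldl_cons, List.foldl_nil, zero_add]
    rw [hstate, hodds]
    by_cases hx : PySem.Int.mod x 2 = 1
    · rw [if_pos hx, min?_id_append_singleton]
      rcases hm : PySem.List.min? (pvOdds xs) (fun y => y) with _ | m
      · -- xs has no odd value: new minimum is x itself
        rw [hm] at ih
        simp only at ih
        rw [ih]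
        simp only
        rw [if_pos ⟨hx, by omega⟩, hlast, if_pos rfl]
      · -- xs has minimum odd value m
        rw [hm] at ih
        simp only at ih
        rw [ih]
        simp only
        by_cases hle : x ≤ m
        · rw [show min m x = x from by omega, if_pos ⟨hx, hle⟩, hlast, if_pos rfl]
        · rw [show min m x = m from by omega, if_neg (fun h => hle h.2), hlast,
            if_neg (fun h => hle (le_of_eq h))]
    · rw [if_neg hx, List.append_nil]
      rcases hm : PySem.List.min? (pvOdds xs) (fun y => y) with _ | m
      · rw [hm] at ih
        simp only at ih
        rw [ih]
        simp only
        rw [if_neg (fun h => hx h.1)]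
      · rw [hm] at ih
        simp only at ih
        have hmmem := PySem.List.min?_mem hm
        have hmodd : PySem.Int.mod m 2 = 1 := by
          have := List.of_mem_filter (p := fun v => decide (PySem.Int.mod v 2 = 1))
            (show m ∈ List.filter _ xs from hmmem)
          exact of_decide_eq_true this
        rw [ih]
        simp only
        rw [if_neg (fun h => hx h.1), hlast, if_neg (fun h => hx (by rw [h]; exact hmodd))]

theorem pv_main (xs : List Int) (hd : Dom_min_odd xs) : min_odd xs = min_odd_alt xs := by
  rw [A_eq_state, alt_eq, state_spec xs hd]
  rcases hm : PySem.List.min? (pvOdds xs) (fun y => y) with _ | m <;> simp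

-- ===== VERDICT (by name: the statement is the Claim_ definition above) =====
theorem min_odd_spec : Claim_equal_min_odd := by
  intro xs hd
  unfold Spec_min_odd
  exact pv_main xs hd
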